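-- pv_equiv track=rewrite | github.com/RizwanMolla/GfG-POTD | Shop in Candy Store/solution.py | minMaxCandy
-- ===== SOURCE A (Python) =====
-- def minMaxCandy(prices, k):
--     prices.sort()
--
--     min_cost = 0
--     start, end = 0, len(prices) - 1
--     while start <= end:
--         min_cost += prices[start]
--         start += 1
--         end -= k
--
--     max_cost = 0
--     start, end = 0, len(prices) - 1
--     while start <= end:
--         max_cost += prices[end]
--         end -= 1
--         start += k
--
--     return [min_cost, max_cost]
-- ===== SOURCE B (Python) =====
-- def minMaxCandy(prices, k):
--     prices.sort()
--     n = len(prices)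
--     p = 0 if n == 0 else (n - 1) // (k + 1) + 1
--     return [sum(prices[:p]), sum(prices[n - p:])]
-- ===== Notes on version B (the rewrite author's own statement) =====
-- stated objective: simpler
-- what changed: Replaced both two-pointer while-loops with the closed-form purchase count p = (n-1)//(k+1)+1 and two slice sums over the sorted list.
import Mathlib
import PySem

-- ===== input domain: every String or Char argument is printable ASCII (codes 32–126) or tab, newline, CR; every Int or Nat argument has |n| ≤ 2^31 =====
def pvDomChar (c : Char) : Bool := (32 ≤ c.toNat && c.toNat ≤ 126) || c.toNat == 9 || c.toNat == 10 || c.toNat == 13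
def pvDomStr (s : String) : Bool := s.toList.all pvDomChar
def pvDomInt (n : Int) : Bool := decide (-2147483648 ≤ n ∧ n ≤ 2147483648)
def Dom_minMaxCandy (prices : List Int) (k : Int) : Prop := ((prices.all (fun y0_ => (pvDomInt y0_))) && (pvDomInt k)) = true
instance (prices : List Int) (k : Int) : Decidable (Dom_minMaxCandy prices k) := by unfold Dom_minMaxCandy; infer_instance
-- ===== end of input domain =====

-- B replaces A's two two-pointer while-loops with the closed-form purchase count p = (n-1)//(k+1)+1
-- and two slice sums over the sorted list (objective: simpler). Both A and B sort `prices` in place;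
-- the equivalence proved here is about the return value.


-- ===== PORT A =====
-- first while-loop of A: min_cost += prices[start]; start += 1; end -= k
-- (fuel only makes the recursion total; under Pre_ the loop runs at most s.length times,
--  and prices[start] is always in range, so `.getD 0` is never the result of a none)
def minLoopA (s : List Int) (k : Int) : Nat → Int → Int → Int → Int
  | 0, acc, _, _ => acc
  | fuel + 1, acc, start, stop =>
      if start ≤ stop then
        minLoopA s k fuel (acc + (PySem.List.pyGet? s start).getD 0) (start + 1) (stop - k)
      else acc

-- second while-loop of A: max_cost += prices[end]; end -= 1; start += k
def maxLoopA (s : List Int) (k : Int) : Nat → Int → Int → Int → Int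
  | 0, acc, _, _ => acc
  | fuel + 1, acc, start, stop =>
      if start ≤ stop then
        maxLoopA s k fuel (acc + (PySem.List.pyGet? s stop).getD 0) (start + k) (stop - 1)
      else acc

def minMaxCandy (prices : List Int) (k : Int) : List Int :=
  let s := PySem.List.sorted prices (fun x => x) false
  let n : Int := (s.length : Int)
  let minCost := minLoopA s k (s.length + 1) 0 0 (n - 1)
  let maxCost := maxLoopA s k (s.length + 1) 0 0 (n - 1)
  [minCost, maxCost]

-- ===== PORT B =====
def minMaxCandy_alt (prices : List Int) (k : Int) : List Int :=
  let s := PySem.List.sorted prices (fun x => x) false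
  let n : Int := (s.length : Int)
  let p : Int := if n = 0 then 0 else PySem.Int.floordiv (n - 1) (k + 1) + 1
  [(PySem.List.slice s none (some p)).sum, (PySem.List.slice s (some (n - p)) none).sum]

-- ===== PRECONDITION & SPEC =====
-- Pre_ excludes nonempty prices with k < 0: there A's while-loops never terminate
-- (end -= k moves end away from start), and with k = -1 B raises ZeroDivisionError.
def Pre_minMaxCandy (prices : List Int) (k : Int) : Prop := prices = [] ∨ 0 ≤ k
instance (prices : List Int) (k : Int) : Decidable (Pre_minMaxCandy prices k) := by unfold Pre_minMaxCandy; infer_instance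
def pvWitness_minMaxCandy : List Int × Int := ([3, 1, 2, 5, 4], 2)

def Spec_minMaxCandy (prices : List Int) (k : Int) (out : List Int) : Prop := out = minMaxCandy_alt prices k
instance (prices : List Int) (k : Int) (out : List Int) : Decidable (Spec_minMaxCandy prices k out) := by unfold Spec_minMaxCandy; infer_instance

-- ===== CLAIM (what is proved, stated in full; the proofs are below) =====
def Claim_equal_minMaxCandy : Prop := ∀ (prices : List Int) (k : Int), Dom_minMaxCandy prices k → Pre_minMaxCandy prices k → Spec_minMaxCandy prices k (minMaxCandy prices k)

-- ===== LEMMAS AND PROOFS =====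

-- the closed-form purchase count, as it appears in B
def pcount (n k : Int) : Int := if n = 0 then 0 else PySem.Int.floordiv (n - 1) (k + 1) + 1

lemma pcount_nonneg (n k : Int) (hn : 0 ≤ n) (hk : 0 ≤ k) : 0 ≤ pcount n k := by
  unfold pcount
  split_ifs with h
  · omega
  · have h1 : (0 : Int) ≤ PySem.Int.floordiv (n - 1) (k + 1) := by
      rw [PySem.Int.le_floordiv_iff_mul_le (by omega)]; omega
    omega

lemma pcount_le (n k : Int) (hn : 0 ≤ n) (hk : 0 ≤ k) : pcount n k ≤ n := by
  unfold pcount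
  split_ifs with h
  · omega
  · have h1 : PySem.Int.floordiv (n - 1) (k + 1) < n := by
      rw [PySem.Int.floordiv_lt_iff_lt_mul (by omega)]
      nlinarith
    omega

-- the loop condition, in both loops, is exactly "i < pcount n k" after i iterations
lemma cond_iff (n k i : Int) (_hn : 0 ≤ n) (hk : 0 ≤ k) (hi : 0 ≤ i) :
    i ≤ n - 1 - i * k ↔ i < pcount n k := by
  unfold pcount
  have hik : 0 ≤ i * k := mul_nonneg hi hk
  split_ifs with h
  · omega
  · have h1 : i ≤ PySem.Int.floordiv (n - 1) (k + 1) ↔ i * (k + 1) ≤ n - 1 :=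
      PySem.Int.le_floordiv_iff_mul_le (by omega)
    have h2 : i * (k + 1) = i * k + i := by ring
    omega

lemma minLoopA_eq (s : List Int) (k : Int) (hk : 0 ≤ k) :
    ∀ (fuel : Nat) (i acc : Int), 0 ≤ i → i ≤ pcount (s.length : Int) k →
      (pcount (s.length : Int) k - i).toNat ≤ fuel →
      minLoopA s k fuel acc i ((s.length : Int) - 1 - i * k)
        = acc + ((s.drop i.toNat).take (pcount (s.length : Int) k - i).toNat).sum := by
  intro fuel
  induction fuel with
  | zero =>
      intro i acc hi hip hf
      have : i = pcount (s.length : Int) k := by omega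
      simp [minLoopA, this]
  | succ fuel ih =>
      intro i acc hi hip hf
      rw [minLoopA]
      by_cases hc : i ≤ (s.length : Int) - 1 - i * k
      · have hlt : i < pcount (s.length : Int) k :=
          (cond_iff _ k i (by positivity) hk hi).mp hc
        have hpn : pcount (s.length : Int) k ≤ (s.length : Int) :=
          pcount_le _ k (by positivity) hk
        have hin : i.toNat < s.length := by omega
        rw [if_pos hc, PySem.List.pyGet?_eq_some_getElem s hi (by omega)]
        have hstep : (s.length : Int) - 1 - i * k - k = (s.length : Int) - 1 - (i + 1) * k := by
          ring
        rw [hstep, ih (i + 1) _ (by omega) (by omega) (by omega)]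
        have hdrop : s.drop i.toNat = s[i.toNat] :: s.drop (i.toNat + 1) :=
          List.drop_eq_getElem_cons hin
        have hi1 : (i + 1).toNat = i.toNat + 1 := by omega
        have hm : (pcount (s.length : Int) k - i).toNat
            = (pcount (s.length : Int) k - (i + 1)).toNat + 1 := by omega
        rw [hm, hdrop, hi1, List.take_succ_cons, List.sum_cons]
        simp [Option.getD]
        ring
      · have hge : pcount (s.length : Int) k ≤ i := by
          by_contra hlt
          exact hc ((cond_iff _ k i (by positivity) hk hi).mpr (by omega))
        have : i = pcount (s.length : Int) k := by omega
        rw [if_neg hc]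
        simp [this]

lemma maxLoopA_eq (s : List Int) (k : Int) (hk : 0 ≤ k) :
    ∀ (fuel : Nat) (i acc : Int), 0 ≤ i → i ≤ pcount (s.length : Int) k →
      (pcount (s.length : Int) k - i).toNat ≤ fuel →
      maxLoopA s k fuel acc (i * k) ((s.length : Int) - 1 - i)
        = acc + ((s.drop ((s.length : Int) - pcount (s.length : Int) k).toNat).take
            (pcount (s.length : Int) k - i).toNat).sum := by
  intro fuel
  induction fuel with
  | zero =>
      intro i acc hi hip hf
      have : i = pcount (s.length : Int) k := by omega
      simp [maxLoopA, this]
  | succ fuel ih =>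
      intro i acc hi hip hf
      rw [maxLoopA]
      set P : Int := pcount (s.length : Int) k with hP
      have hpn : P ≤ (s.length : Int) := pcount_le _ k (by positivity) hk
      have hp0 : 0 ≤ P := pcount_nonneg _ k (by positivity) hk
      by_cases hc : i * k ≤ (s.length : Int) - 1 - i
      · have hc' : i ≤ (s.length : Int) - 1 - i * k := by omega
        have hlt : i < P := (cond_iff _ k i (by positivity) hk hi).mp hc'
        have hin : ((s.length : Int) - 1 - i).toNat < s.length := by omega
        rw [if_pos hc, PySem.List.pyGet?_eq_some_getElem s (by omega) (by omega)]
        have hstep : i * k + k = (i + 1) * k := by ring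
        have hstop : (s.length : Int) - 1 - i - 1 = (s.length : Int) - 1 - (i + 1) := by ring
        rw [hstep, hstop, ih (i + 1) _ (by omega) (by omega) (by omega)]
        -- the slice of remaining top elements gains its LAST element at each step
        set d : Nat := ((s.length : Int) - P).toNat with hd
        have hlen : (s.drop d).length = P.toNat - (0 : Nat) := by
          simp [hd]; omega
        have hm : (P - i).toNat = (P - (i + 1)).toNat + 1 := by omega
        have hmlt : (P - (i + 1)).toNat < (s.drop d).length := by
          rw [List.length_drop]; omega
        rw [hm, List.take_add_one, List.getElem?_eq_getElem hmlt, List.sum_append]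
        have hidx : (s.drop d)[(P - (i + 1)).toNat] = s[d + (P - (i + 1)).toNat]'(by
            rw [List.length_drop] at hmlt; omega) := List.getElem_drop
        have hsame : d + (P - (i + 1)).toNat = ((s.length : Int) - 1 - i).toNat := by omega
        simp only [hidx]
        simp only [hsame]
        simp [Option.getD]
        ring
      · have hge : P ≤ i := by
          by_contra hlt
          have h2 := (cond_iff (s.length : Int) k i (by positivity) hk hi).mpr (by omega)
          omega
        have : i = P := by omega
        rw [if_neg hc]
        simp [this]

lemma minMaxCandy_loops_eq_slices (s : List Int) (k : Int) (hk : 0 ≤ k) :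
    [minLoopA s k (s.length + 1) 0 0 ((s.length : Int) - 1),
     maxLoopA s k (s.length + 1) 0 0 ((s.length : Int) - 1)]
      = [(PySem.List.slice s none (some (if (s.length : Int) = 0 then 0
            else PySem.Int.floordiv ((s.length : Int) - 1) (k + 1) + 1))).sum,
         (PySem.List.slice s (some ((s.length : Int) - (if (s.length : Int) = 0 then 0
            else PySem.Int.floordiv ((s.length : Int) - 1) (k + 1) + 1))) none).sum] := by
  have hn0 : (0 : Int) ≤ (s.length : Int) := by positivity
  have hp0 := pcount_nonneg (s.length : Int) k hn0 hk
  have hpn := pcount_le (s.length : Int) k hn0 hk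
  have hmin := minLoopA_eq s k hk (s.length + 1) 0 0 (by omega) hp0 (by omega)
  have hmax := maxLoopA_eq s k hk (s.length + 1) 0 0 (by omega) hp0 (by omega)
  simp only [zero_mul, sub_zero, Int.toNat_zero, List.drop_zero, zero_add] at hmin hmax
  have hpc : (if (s.length : Int) = 0 then (0 : Int)
      else PySem.Int.floordiv ((s.length : Int) - 1) (k + 1) + 1) = pcount (s.length : Int) k := rfl
  rw [List.take_of_length_le (by rw [List.length_drop]; omega)] at hmax
  rw [hmin, hmax, hpc, PySem.List.slice_to s hp0, PySem.List.slice_from s (by omega)]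

-- ===== VERDICT (by name: the statement is the Claim_ definition above) =====
theorem minMaxCandy_spec : Claim_equal_minMaxCandy := by
  intro prices k _ hpre
  unfold Spec_minMaxCandy minMaxCandy minMaxCandy_alt
  rcases hpre with hemp | hk
  · subst hemp
    simp [PySem.List.sorted, minLoopA, maxLoopA, PySem.List.slice]
  · exact minMaxCandy_loops_eq_slices (PySem.List.sorted prices (fun x => x) false) k hk
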